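-- pv_equiv track=rewrite | github.com/pypi-data/pypi-mirror-359 | packages/autoDCR/autodcr-0.3.0.tar.gz/autodcr-0.3.0/src/autoDCRscripts/autoDCRfunctions.py | variant_position
-- ===== SOURCE A (Python) =====
-- def variant_position(start_index, ref_seq, var_seq):
--     # todo docstr
--     if len(ref_seq) != len(var_seq):
--         return '!'
--     var_site = [x for x in range(len(ref_seq)) if ref_seq[x] != var_seq[x]]
--     if len(var_site) == 1:
--         var_site = var_site[0]
--         return ref_seq[var_site] + str(start_index + 1 + var_site) + var_seq[var_site]
--     else:
--         return '?'
-- ===== SOURCE B (Python) =====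
-- def variant_position(start_index, ref_seq, var_seq):
--     # Common-prefix decomposition: scan to the first divergence point p, then
--     # "exactly one mismatch" reduces to equality of the tails after p.
--     if len(ref_seq) != len(var_seq):
--         return '!'
--     n = len(ref_seq)
--     p = 0
--     while p < n and ref_seq[p] == var_seq[p]:
--         p += 1
--     if p == n or ref_seq[p + 1:] != var_seq[p + 1:]:
--         return '?'
--     return ref_seq[p] + str(start_index + 1 + p) + var_seq[p]
-- ===== Notes on version B (the rewrite author's own statement) =====
-- stated objective: alternative
-- what changed: B replaces A's build-the-full-mismatch-index-list-and-test-its-length approach with a common-prefix scan to the first divergence followed by a single tail-slice equality test (exactly one mismatch iff the tails after the first divergence are equal).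
import Mathlib
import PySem

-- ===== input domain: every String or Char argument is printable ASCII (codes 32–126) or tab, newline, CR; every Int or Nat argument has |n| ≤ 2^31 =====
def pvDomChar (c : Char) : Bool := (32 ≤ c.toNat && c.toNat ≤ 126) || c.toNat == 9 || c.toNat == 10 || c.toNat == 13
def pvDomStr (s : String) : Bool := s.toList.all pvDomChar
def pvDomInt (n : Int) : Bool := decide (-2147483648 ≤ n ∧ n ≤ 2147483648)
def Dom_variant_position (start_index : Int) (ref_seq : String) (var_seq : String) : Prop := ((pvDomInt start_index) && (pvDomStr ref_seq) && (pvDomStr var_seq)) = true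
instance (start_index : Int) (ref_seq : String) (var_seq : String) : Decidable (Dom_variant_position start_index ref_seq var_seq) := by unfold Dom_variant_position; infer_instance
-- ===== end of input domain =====

-- B replaces A's full mismatch-index list with a common-prefix scan to the first divergence
-- followed by one tail equality test (a different decomposition of the same task).

-- ===== PORT A =====
-- transliteration of A: length guard, comprehension over range(len), then the length-1 test.
-- ref_seq[i] in the returned string is a 1-char string; built here as chars inside one String.ofList
-- (exact: Python's '+' on these strings concatenates the same characters). The `.getD ' '` default
-- is never used: the index comes from the filtered range, so it is always in range.
def variant_position (start_index : Int) (ref_seq : String) (var_seq : String) : String :=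
  if PySem.Str.len ref_seq ≠ PySem.Str.len var_seq then "!"
  else
    let var_site : List Int := (PySem.List.pyRange 0 (PySem.Str.len ref_seq) 1).filter
        (fun x => PySem.Str.pyGet? ref_seq x ≠ PySem.Str.pyGet? var_seq x)
    if var_site.length = 1 then
      let i := PySem.List.pyGetD var_site 0 0
      String.ofList ([(PySem.Str.pyGet? ref_seq i).getD ' ']
                 ++ PySem.Int.toChars (start_index + 1 + i)
                 ++ [(PySem.Str.pyGet? var_seq i).getD ' '])
    else "?"

-- ===== PORT B =====
-- transliteration of B's while loop: advance p while the characters agree (lengths are equal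
-- here, so the paired structural recursion is exactly the `p < n and ref[p] == var[p]` loop).
def prefLoop : List Char → List Char → Nat → Nat
  | c1 :: t1, c2 :: t2, p => if c1 = c2 then prefLoop t1 t2 (p + 1) else p
  | _, _, p => p

-- Python's string comparison `ref_seq[p+1:] != var_seq[p+1:]` is exactly inequality of the
-- sliced character lists.
def variant_position_alt (start_index : Int) (ref_seq : String) (var_seq : String) : String :=
  if PySem.Str.len ref_seq ≠ PySem.Str.len var_seq then "!"
  else
    let n := PySem.Str.len ref_seq
    let p := prefLoop ref_seq.toList var_seq.toList 0
    if (p : Int) = n ∨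
        PySem.Chars.slice ref_seq.toList (some ((p : Int) + 1)) none ≠
        PySem.Chars.slice var_seq.toList (some ((p : Int) + 1)) none then "?"
    else
      String.ofList ([(PySem.Str.pyGet? ref_seq (p : Int)).getD ' ']
                 ++ PySem.Int.toChars (start_index + 1 + (p : Int))
                 ++ [(PySem.Str.pyGet? var_seq (p : Int)).getD ' '])

-- ===== PRECONDITION & SPEC =====
def Spec_variant_position (start_index : Int) (ref_seq : String) (var_seq : String) (out : String) : Prop := out = variant_position_alt start_index ref_seq var_seq
instance (start_index : Int) (ref_seq : String) (var_seq : String) (out : String) : Decidable (Spec_variant_position start_index ref_seq var_seq out) := by unfold Spec_variant_position; infer_instance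

-- ===== CLAIM =====
def Claim_equal_variant_position : Prop := ∀ (start_index : Int) (ref_seq : String) (var_seq : String), Dom_variant_position start_index ref_seq var_seq → Spec_variant_position start_index ref_seq var_seq (variant_position start_index ref_seq var_seq)

-- ===== LEMMAS AND PROOFS =====

-- relative mismatch positions of two equal-length char lists
def msIdx : List Char → List Char → List Nat
  | c1 :: t1, c2 :: t2 =>
      if c1 ≠ c2 then 0 :: (msIdx t1 t2).map Nat.succ else (msIdx t1 t2).map Nat.succ
  | _, _ => []

lemma filter_range_eq_msIdx : ∀ (r v : List Char), r.length = v.length →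
    (List.range r.length).filter (fun x => !decide (r[x]? = v[x]?)) = msIdx r v := by
  intro r
  induction r with
  | nil => intro v h; simp [msIdx]
  | cons c1 t1 ih =>
    intro v h
    cases v with
    | nil => simp at h
    | cons c2 t2 =>
      simp only [List.length_cons] at h
      simp only [List.length_cons, List.range_succ_eq_map, List.filter_cons, List.filter_map,
        Function.comp_def, List.getElem?_cons_succ, List.getElem?_cons_zero, msIdx]
      by_cases hc : c1 = c2
      · rw [if_neg (by simp [hc]), if_neg (by simp [hc])]
        exact congrArg (List.map Nat.succ) (ih t2 (by omega))
      · rw [if_pos (by simp [hc]), if_pos (by simp [hc])]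
        exact congrArg (fun l => 0 :: List.map Nat.succ l) (ih t2 (by omega))

lemma filterA_eq : ∀ (r v : List Char), r.length = v.length →
    (PySem.List.pyRange 0 (r.length : Int) 1).filter
        (fun x => PySem.Chars.pyGet? r x ≠ PySem.Chars.pyGet? v x)
      = (msIdx r v).map (fun n : Nat => (n : Int)) := by
  intro r v h
  rw [PySem.List.pyRange_zero_natCast, List.filter_map]
  have hp : ((fun x => decide (PySem.Chars.pyGet? r x ≠ PySem.Chars.pyGet? v x)) ∘ (fun n : Nat => (n : Int)))
      = fun x : Nat => !decide (r[x]? = v[x]?) := by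
    funext x; simp [Function.comp]
  rw [hp, filter_range_eq_msIdx r v h]

lemma filterA_eq' (r v : String) (h : r.toList.length = v.toList.length) :
    (PySem.List.pyRange 0 (PySem.Str.len r) 1).filter
        (fun x => PySem.Str.pyGet? r x ≠ PySem.Str.pyGet? v x)
      = (msIdx r.toList v.toList).map (fun n : Nat => (n : Int)) := by
  have hpred : (fun x : Int => decide (PySem.Str.pyGet? r x ≠ PySem.Str.pyGet? v x))
      = (fun x : Int => decide (PySem.Chars.pyGet? r.toList x ≠ PySem.Chars.pyGet? v.toList x)) := by
    funext x; simp
  have hlen : PySem.Str.len r = (r.toList.length : Int) := by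
    simp [PySem.Str.len_eq, String.length_toList]
  calc (PySem.List.pyRange 0 (PySem.Str.len r) 1).filter
        (fun x => decide (PySem.Str.pyGet? r x ≠ PySem.Str.pyGet? v x))
      = (PySem.List.pyRange 0 ((r.toList.length : Nat) : Int) 1).filter
        (fun x => decide (PySem.Chars.pyGet? r.toList x ≠ PySem.Chars.pyGet? v.toList x)) := by
        rw [hlen, hpred]
    _ = (msIdx r.toList v.toList).map (fun n : Nat => (n : Int)) := filterA_eq r.toList v.toList h

lemma msIdx_nil_iff : ∀ (r v : List Char), r.length = v.length → (msIdx r v = [] ↔ r = v) := by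
  intro r
  induction r with
  | nil => intro v h; cases v with
    | nil => simp [msIdx]
    | cons c t => simp at h
  | cons c1 t1 ih =>
    intro v h
    cases v with
    | nil => simp at h
    | cons c2 t2 =>
      simp only [List.length_cons] at h
      by_cases hc : c1 = c2 <;>
        simp [msIdx, hc, List.map_eq_nil_iff, ih t2 (by omega)]

lemma msIdx_lt : ∀ (r v : List Char) (x : Nat), x ∈ msIdx r v → x < r.length := by
  intro r
  induction r with
  | nil => intro v x hx; cases v <;> simp [msIdx] at hx
  | cons c1 t1 ih =>
    intro v x hx
    cases v with
    | nil => simp [msIdx] at hx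
    | cons c2 t2 =>
      by_cases hc : c1 = c2
      · simp only [msIdx, hc, ne_eq, not_true_eq_false, if_false, List.mem_map] at hx
        obtain ⟨y, hy, rfl⟩ := hx
        have := ih t2 y hy
        simp; omega
      · simp only [msIdx, hc, ne_eq, not_false_eq_true, if_true, List.mem_cons, List.mem_map] at hx
        rcases hx with rfl | ⟨y, hy, rfl⟩
        · simp
        · have := ih t2 y hy
          simp; omega

lemma prefLoop_eq : ∀ (r v : List Char) (i : Nat), r.length = v.length →
    prefLoop r v i = (match msIdx r v with | [] => i + r.length | a :: _ => i + a) := by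
  intro r
  induction r with
  | nil => intro v i h; cases v with
    | nil => simp [prefLoop, msIdx]
    | cons c t => simp at h
  | cons c1 t1 ih =>
    intro v i h
    cases v with
    | nil => simp at h
    | cons c2 t2 =>
      simp only [List.length_cons] at h
      by_cases hc : c1 = c2
      · simp only [prefLoop, if_pos hc]
        rw [ih t2 (i + 1) (by omega)]
        simp only [msIdx, hc, ne_eq, not_true_eq_false, if_false, List.length_cons]
        cases hm : msIdx t1 t2 with
        | nil => show i + 1 + t1.length = i + (t1.length + 1); omega
        | cons a rest => show i + 1 + a = i + a.succ; omega
      · simp only [prefLoop, if_neg hc]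
        simp only [msIdx, hc, ne_eq, not_false_eq_true, if_true]
        show i = i + 0
        omega

lemma prefLoop_nil (r v : List Char) (i : Nat) (h : r.length = v.length)
    (hm : msIdx r v = []) : prefLoop r v i = i + r.length := by
  rw [prefLoop_eq r v i h, hm]

lemma prefLoop_cons (r v : List Char) (i : Nat) (h : r.length = v.length)
    (a : Nat) (rest : List Nat) (hm : msIdx r v = a :: rest) : prefLoop r v i = i + a := by
  rw [prefLoop_eq r v i h, hm]

lemma drop_iff : ∀ (r v : List Char) (a : Nat) (rest : List Nat), r.length = v.length →
    msIdx r v = a :: rest → (rest = [] ↔ r.drop (a + 1) = v.drop (a + 1)) := by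
  intro r
  induction r with
  | nil => intro v a rest h hm; cases v <;> simp [msIdx] at hm
  | cons c1 t1 ih =>
    intro v a rest h hm
    cases v with
    | nil => simp at h
    | cons c2 t2 =>
      simp only [List.length_cons] at h
      by_cases hc : c1 = c2
      · simp only [msIdx, hc, ne_eq, not_true_eq_false, if_false] at hm
        cases hm' : msIdx t1 t2 with
        | nil => rw [hm'] at hm; simp at hm
        | cons a' rest' =>
          rw [hm'] at hm
          simp only [List.map_cons] at hm
          obtain ⟨ha, hrest⟩ := List.cons.inj hm
          subst ha hrest
          rw [List.drop_succ_cons, List.drop_succ_cons]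
          constructor
          · intro he
            have : rest' = [] := by simpa [List.map_eq_nil_iff] using he
            exact ((ih t2 a' rest' (by omega) hm').mp this)
          · intro he
            have := (ih t2 a' rest' (by omega) hm').mpr he
            simp [this]
      · simp only [msIdx, hc, ne_eq, not_false_eq_true, if_true] at hm
        obtain ⟨ha, hrest⟩ := List.cons.inj hm
        subst ha
        rw [List.drop_succ_cons, List.drop_succ_cons, List.drop_zero, List.drop_zero]
        rw [← hrest]
        simp [List.map_eq_nil_iff, msIdx_nil_iff t1 t2 (by omega)]

-- ===== VERDICT =====
theorem variant_position_spec : Claim_equal_variant_position := by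
  intro s r v _
  unfold Spec_variant_position variant_position variant_position_alt
  by_cases hL : r.toList.length = v.toList.length
  · have hlen : PySem.Str.len r = PySem.Str.len v := by
      simp only [PySem.Str.len_eq, hL]
    rw [if_neg (not_not_intro hlen), if_neg (not_not_intro hlen)]
    rw [filterA_eq' r v hL]
    cases hm : msIdx r.toList v.toList with
    | nil =>
      rw [prefLoop_nil r.toList v.toList 0 hL hm]
      simp
    | cons a rest =>
      rw [prefLoop_cons r.toList v.toList 0 hL a rest hm]
      have ha : a < r.toList.length := msIdx_lt r.toList v.toList a (by rw [hm]; simp)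
      have ha' : a ≠ r.length := Nat.ne_of_lt (by rw [← String.length_toList]; exact ha)
      have hslice : PySem.List.slice r.toList (some ((a : Int) + 1)) none
            = r.toList.drop (a + 1) := by
        rw [show ((a : Int) + 1) = (((a + 1 : Nat)) : Int) by push_cast; ring,
          PySem.List.slice_from_natCast]
      have hslice' : PySem.List.slice v.toList (some ((a : Int) + 1)) none
            = v.toList.drop (a + 1) := by
        rw [show ((a : Int) + 1) = (((a + 1 : Nat)) : Int) by push_cast; ring,
          PySem.List.slice_from_natCast]
      cases rest with
      | nil =>
        have hd : r.toList.drop (a + 1) = v.toList.drop (a + 1) :=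
          (drop_iff r.toList v.toList a [] hL hm).mp rfl
        simp [hslice, hslice', hd, ha', PySem.List.pyGetD_zero_cons]
      | cons b rest' =>
        have hd : r.toList.drop (a + 1) ≠ v.toList.drop (a + 1) := by
          intro he
          exact absurd ((drop_iff r.toList v.toList a (b :: rest') hL hm).mpr he) (by simp)
        simp [hslice, hslice', hd]
  · have hlen : PySem.Str.len r ≠ PySem.Str.len v := by
      simp only [PySem.Str.len_eq]
      have h2 : r.length ≠ v.length := fun h => hL (by simpa [String.length_toList] using h)
      exact_mod_cast h2
    rw [if_pos hlen, if_pos hlen]
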